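-- pv_equiv track=rewrite | github.com/Salihefendihsa/auraproject-ai-service | ai_service/app/routes.py | _compute_aggregate_tryon_mode
-- ===== SOURCE A (Python) =====
-- def _compute_aggregate_tryon_mode(outfits: list) -> str:
--     """Compute aggregate tryon_mode from all outfits."""
--     modes = [o.get("tryon_mode", "mock") for o in outfits]
--
--     if all(m == "full" for m in modes):
--         return "full"
--     elif all(m == "mock" for m in modes):
--         return "mock"
--     elif all(m == "partial" for m in modes):
--         return "partial"
--     elif all(m == "partial_fallback" for m in modes):
--         return "partial_fallback"
--     else:
--         return "mixed"
-- ===== SOURCE B (Python) =====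
-- def _compute_aggregate_tryon_mode(outfits: list) -> str:
--     """Single pass with an accumulator and early exit instead of four all() scans."""
--     agg = None
--     for o in outfits:
--         m = o.get("tryon_mode", "mock")
--         if agg is None:
--             agg = m
--         elif agg != m:
--             return "mixed"
--     if agg is None:
--         return "full"
--     return agg if agg in ("full", "mock", "partial", "partial_fallback") else "mixed"
-- ===== Notes on version B (the rewrite author's own statement) =====
-- stated objective: alternative
-- what changed: Replaces the materialized modes list plus four separate all() scans by a single pass over outfits with one accumulator and an early 'mixed' exit on the first mismatch.
import Mathlib
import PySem

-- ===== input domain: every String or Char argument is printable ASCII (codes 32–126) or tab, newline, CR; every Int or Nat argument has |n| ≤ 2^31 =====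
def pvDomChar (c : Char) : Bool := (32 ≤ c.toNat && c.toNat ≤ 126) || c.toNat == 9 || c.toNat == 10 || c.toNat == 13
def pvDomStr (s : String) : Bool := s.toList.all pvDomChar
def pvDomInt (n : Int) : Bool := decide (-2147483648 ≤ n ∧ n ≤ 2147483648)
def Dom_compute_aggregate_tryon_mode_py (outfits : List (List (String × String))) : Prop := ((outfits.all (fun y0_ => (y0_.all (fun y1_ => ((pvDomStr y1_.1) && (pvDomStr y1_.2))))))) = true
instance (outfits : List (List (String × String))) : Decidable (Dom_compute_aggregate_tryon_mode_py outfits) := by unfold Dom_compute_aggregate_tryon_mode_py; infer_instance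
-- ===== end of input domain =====

-- B replaces A's modes list and four separate all() scans by one pass with an
-- accumulator and an early "mixed" exit; same return value on every input.


-- ===== PORT A =====
-- o.get("tryon_mode", "mock"): first-match association-list lookup with default
def tryonModeOf (o : List (String × String)) : String :=
  (o.lookup "tryon_mode").getD "mock"

def compute_aggregate_tryon_mode_py (outfits : List (List (String × String))) : String :=
  let modes := outfits.map tryonModeOf
  if modes.all (· == "full") then "full"
  else if modes.all (· == "mock") then "mock"
  else if modes.all (· == "partial") then "partial"
  else if modes.all (· == "partial_fallback") then "partial_fallback"
  else "mixed"

-- ===== PORT B =====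
-- the final 'agg if agg in (...) else "mixed"' of Source B
def tryonFinal (a : String) : String :=
  if a == "full" || a == "mock" || a == "partial" || a == "partial_fallback" then a else "mixed"

-- Source B's loop: agg is the accumulator, early return "mixed" on mismatch
def tryonGo (agg : Option String) : List (List (String × String)) → String
  | [] =>
    match agg with
    | none => "full"
    | some a => tryonFinal a
  | o :: rest =>
    let m := tryonModeOf o
    match agg with
    | none => tryonGo (some m) rest
    | some a => if a == m then tryonGo (some a) rest else "mixed"

def compute_aggregate_tryon_mode_py_alt (outfits : List (List (String × String))) : String :=
  tryonGo none outfits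

-- ===== PRECONDITION & SPEC =====
def Spec_compute_aggregate_tryon_mode_py (outfits : List (List (String × String))) (out : String) : Prop := out = compute_aggregate_tryon_mode_py_alt outfits
instance (outfits : List (List (String × String))) (out : String) : Decidable (Spec_compute_aggregate_tryon_mode_py outfits out) := by unfold Spec_compute_aggregate_tryon_mode_py; infer_instance

-- ===== CLAIM (what is proved, stated in full; the proofs are below) =====
def Claim_equal_compute_aggregate_tryon_mode_py : Prop := ∀ (outfits : List (List (String × String))), Dom_compute_aggregate_tryon_mode_py outfits → Spec_compute_aggregate_tryon_mode_py outfits (compute_aggregate_tryon_mode_py outfits)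

-- ===== LEMMAS AND PROOFS =====

-- once the accumulator is 'some a', B returns a's final value iff every remaining mode equals a
theorem tryonGo_some (a : String) (t : List (List (String × String))) :
    tryonGo (some a) t =
      if (t.map tryonModeOf).all (· == a) then tryonFinal a else "mixed" := by
  induction t with
  | nil => simp [tryonGo]
  | cons o rest ih =>
    simp only [tryonGo, List.map_cons, List.all_cons]
    by_cases h : a = tryonModeOf o
    · have hb : (a == tryonModeOf o) = true := by simp [h]
      have hb2 : (tryonModeOf o == a) = true := by simp [h]
      simp [hb, hb2, ih]
    · have hb : (a == tryonModeOf o) = false := by simp [h]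
      have hb2 : (tryonModeOf o == a) = false := by
        simp; exact fun e => h e.symm
      simp [hb, hb2]

theorem all_cons_label (m l : String) (tm : List String) :
    ((m :: tm).all (· == l)) = ((m == l) && tm.all (· == m)) := by
  by_cases h : m = l
  · subst h; simp
  · have hb : (m == l) = false := by simp [h]
    simp [hb]

-- ===== VERDICT (by name: the statement is the Claim_ definition above) =====
theorem compute_aggregate_tryon_mode_py_spec : Claim_equal_compute_aggregate_tryon_mode_py := by
  intro outfits _
  unfold Spec_compute_aggregate_tryon_mode_py
  cases outfits with
  | nil => rfl
  | cons o t =>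
    simp only [compute_aggregate_tryon_mode_py, compute_aggregate_tryon_mode_py_alt,
      tryonGo, List.map_cons]
    rw [tryonGo_some]
    simp only [all_cons_label]
    generalize (t.map tryonModeOf) = tm
    generalize tryonModeOf o = m
    by_cases hall : tm.all (· == m)
    · simp only [hall, Bool.and_true]
      unfold tryonFinal
      by_cases h1 : m = "full"
      · simp [h1]
      · by_cases h2 : m = "mock"
        · simp [h2]
        · by_cases h3 : m = "partial"
          · simp [h3]
          · by_cases h4 : m = "partial_fallback"
            · simp [h4]
            · simp [h1, h2, h3, h4]
    · simp [hall]
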